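-- pv_equiv track=rewrite | github.com/lucasnfe/puct-music-emotion | workspace/encoder.py | _get_duration_values
-- ===== SOURCE A (Python) =====
-- BEAT_RESOL = 1024
--
-- DEFAULT_NOTE_RANGE = 8
--
-- DEFAULT_NOTE_DOTS  = 4
--
-- def _get_duration_values(note_range=DEFAULT_NOTE_RANGE, dots=DEFAULT_NOTE_DOTS, tempo=120):
--     note_types = []
--
--     # Generate all possible notes
--     note_length = int(note_range * BEAT_RESOL)
--
--     while note_length >= BEAT_RESOL//note_range:
--         # Append current note length (e.g. whole, half, quarter...)
--         note_types.append(note_length)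
--
--         # Generate dot divisions
--         dot_length = note_length//2
--         dotted_note_length = note_length + dot_length
--         for i in range(1, dots):
--             # Append current dotted note
--             note_types.append(dotted_note_length)
--
--             dot_length = dot_length//2
--             dotted_note_length = dotted_note_length + dot_length
--
--         note_length = note_length//2
--
--     return note_types
-- ===== SOURCE B (Python) =====
-- BEAT_RESOL = 1024
--
-- DEFAULT_NOTE_RANGE = 8
--
-- DEFAULT_NOTE_DOTS  = 4
--
-- def _get_duration_values(note_range=DEFAULT_NOTE_RANGE, dots=DEFAULT_NOTE_DOTS, tempo=120):
--     # No positive note lengths for a non-positive range.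
--     if note_range < 1:
--         return []
--     lo = BEAT_RESOL // note_range
--     d = dots if dots > 1 else 1
--     # Pass 1: collect every base note length by repeated halving.
--     halvings = []
--     x = note_range * BEAT_RESOL
--     while x >= lo:
--         halvings.append(x)
--         x //= 2
--     n = len(halvings)
--     # Extend with d-1 further halvings so every dot window fits.
--     for _ in range(d - 1):
--         halvings.append(x)
--         x //= 2
--     # Pass 2: prefix sums of the halvings.
--     prefix = [0]
--     for h in halvings:
--         prefix.append(prefix[-1] + h)
--     # Pass 3: each (dotted) duration is a window sum of consecutive halvings.
--     return [prefix[k + i + 1] - prefix[k] for k in range(n) for i in range(d)]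
-- ===== Notes on version B (the rewrite author's own statement) =====
-- stated objective: alternative
-- what changed: Replaces A's interleaved while loop with running dot accumulators by three staged passes: collect the list of repeated halvings, build its prefix sums, then emit every (dotted) duration as a sliding-window sum prefix[k+i+1]-prefix[k]; correct because a dotted value is exactly the sum of consecutive halvings and (m//2)//2 == m//4.
import Mathlib
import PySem

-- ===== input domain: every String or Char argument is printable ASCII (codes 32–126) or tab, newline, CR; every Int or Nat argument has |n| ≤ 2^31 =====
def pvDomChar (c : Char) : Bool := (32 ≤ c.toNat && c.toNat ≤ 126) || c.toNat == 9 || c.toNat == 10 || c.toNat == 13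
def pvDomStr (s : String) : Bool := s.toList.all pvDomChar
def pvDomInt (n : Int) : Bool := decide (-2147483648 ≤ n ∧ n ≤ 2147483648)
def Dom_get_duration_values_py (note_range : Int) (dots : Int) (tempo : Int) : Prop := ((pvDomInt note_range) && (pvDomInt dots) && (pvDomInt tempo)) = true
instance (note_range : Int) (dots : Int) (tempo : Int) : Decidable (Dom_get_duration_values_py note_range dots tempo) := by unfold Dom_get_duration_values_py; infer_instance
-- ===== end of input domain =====

-- B replaces A's interleaved while loop with running dot accumulators by three staged passes:
-- the list of repeated halvings, its prefix sums, then every duration as a window sum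
-- (objective: alternative decomposition, same cost class).

-- ===== PORT A =====
-- inner 'for i in range(1, dots)' loop of A, on its state (dot_length, dotted_note_length, note_types)
def aDotLoop : Nat → Int → Int → List Int → List Int
  | 0, _, _, acc => acc
  | d + 1, dot, dotted, acc =>
      aDotLoop d (PySem.Int.floordiv dot 2)
        (dotted + PySem.Int.floordiv dot 2) (acc ++ [dotted])

-- outer 'while note_length >= BEAT_RESOL//note_range' loop of A; fuel-based recursion
-- (inside Pre_ the loop runs at most 21 times, so fuel 64 is never exhausted)
def aLoop : Nat → Int → Int → Int → List Int → List Int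
  | 0, _, _, _, acc => acc
  | fuel + 1, n, lo, dots, acc =>
      if lo ≤ n then
        aLoop fuel (PySem.Int.floordiv n 2) lo dots
          (aDotLoop (dots - 1).toNat (PySem.Int.floordiv n 2)
            (n + PySem.Int.floordiv n 2) (acc ++ [n]))
      else acc

def get_duration_values_py (note_range : Int) (dots : Int) (tempo : Int) : List Int :=
  aLoop 64 (note_range * 1024) (PySem.Int.floordiv 1024 note_range) dots []

-- ===== PORT B =====
-- Pass 1: 'while x >= lo: halvings.append(x); x //= 2' — fuel-based recursion, returns
-- (halvings, final x) (inside Pre_ the loop runs at most 21 times, so fuel 64 suffices)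
def bHalve : Nat → Int → Int → List Int → List Int × Int
  | 0, x, _, acc => (acc, x)
  | fuel + 1, x, lo, acc =>
      if lo ≤ x then bHalve fuel (PySem.Int.floordiv x 2) lo (acc ++ [x])
      else (acc, x)

-- 'for _ in range(d - 1): halvings.append(x); x //= 2'
def bExtend : Nat → Int → List Int → List Int
  | 0, _, acc => acc
  | e + 1, x, acc => bExtend e (PySem.Int.floordiv x 2) (acc ++ [x])

-- Pass 2: 'prefix = [0]; for h in halvings: prefix.append(prefix[-1] + h)'
-- ('prefix[-1]' is getLastD 0; the list starts as [0] so it is never empty)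
def bPrefix (hs : List Int) : List Int :=
  hs.foldl (fun p h => p ++ [p.getLastD 0 + h]) [0]

-- Pass 3: the returned comprehension; 'prefix[k+i+1]' / 'prefix[k]' indices are always
-- in range, so getD _ 0 is exact
def bOut (pre : List Int) (n d : Nat) : List Int :=
  (List.range n).flatMap (fun k =>
    (List.range d).map (fun i => pre.getD (k + i + 1) 0 - pre.getD k 0))

-- glue the three passes together (r = (halvings, x) after pass 1, d = max(dots,1))
def bWindows (r : List Int × Int) (d : Nat) : List Int :=
  bOut (bPrefix (bExtend (d - 1) r.2 r.1)) r.1.length d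

def get_duration_values_py_alt (note_range : Int) (dots : Int) (tempo : Int) : List Int :=
  if note_range < 1 then []
  else
    bWindows (bHalve 64 (note_range * 1024) (PySem.Int.floordiv 1024 note_range) [])
      ((if 1 < dots then dots else 1).toNat)

-- ===== PRECONDITION & SPEC =====
-- Pre_ excludes note_range = 0 (A raises ZeroDivisionError), note_range = -1 and
-- note_range > 1024 (A's while loop never terminates). On all other inputs A returns.
def Pre_get_duration_values_py (note_range : Int) (dots : Int) (tempo : Int) : Prop :=
  note_range ≤ -2 ∨ (1 ≤ note_range ∧ note_range ≤ 1024)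
instance (note_range : Int) (dots : Int) (tempo : Int) : Decidable (Pre_get_duration_values_py note_range dots tempo) := by unfold Pre_get_duration_values_py; infer_instance

def pvWitness_get_duration_values_py : Int × Int × Int := (8, 4, 120)

def Spec_get_duration_values_py (note_range : Int) (dots : Int) (tempo : Int) (out : List Int) : Prop := out = get_duration_values_py_alt note_range dots tempo
instance (note_range : Int) (dots : Int) (tempo : Int) (out : List Int) : Decidable (Spec_get_duration_values_py note_range dots tempo out) := by unfold Spec_get_duration_values_py; infer_instance

-- ===== CLAIM (what is proved, stated in full; the proofs are below) =====
def Claim_equal_get_duration_values_py : Prop := ∀ (note_range : Int) (dots : Int) (tempo : Int), Dom_get_duration_values_py note_range dots tempo → Pre_get_duration_values_py note_range dots tempo → Spec_get_duration_values_py note_range dots tempo (get_duration_values_py note_range dots tempo)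

-- ===== LEMMAS AND PROOFS =====

-- Python's m >> k (proof-side abbreviation)
def pyShr (m : Int) (k : Nat) : Int := m >>> k

-- closed form of A's running accumulator: m plus its first i dot contributions
def bSum (m : Int) (i : Nat) : Int := ((List.range i).map (fun j => pyShr m (j + 1))).sum

-- one more floor-halving of a >> k is a >> (k+1)  (nonnegative a, stated over Nat-cast)
theorem floordiv_pyShr (a : Nat) (k : Nat) :
    PySem.Int.floordiv (pyShr (a : Int) k) 2 = pyShr (a : Int) (k + 1) := by
  have h1 : pyShr (a : Int) k = ((a >>> k : Nat) : Int) := rfl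
  have h2 : pyShr (a : Int) (k + 1) = ((a >>> (k + 1) : Nat) : Int) := rfl
  rw [h1, h2, Nat.shiftRight_succ]
  exact_mod_cast PySem.Int.floordiv_natCast (a >>> k) 2

theorem pyShr_zero (m : Int) : pyShr m 0 = m := by simp [pyShr]

theorem pyShr_comp (a : Nat) (k j : Nat) :
    pyShr (pyShr (a : Int) k) j = pyShr (a : Int) (k + j) := by
  have h1 : pyShr (a : Int) k = ((a >>> k : Nat) : Int) := rfl
  rw [h1]
  show ((((a >>> k) >>> j : Nat)) : Int) = ((a >>> (k + j) : Nat) : Int)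
  rw [Nat.shiftRight_add]

theorem bSum_zero (m : Int) : bSum m 0 = 0 := by simp [bSum]

theorem bSum_succ (m : Int) (i : Nat) : bSum m (i + 1) = bSum m i + pyShr m (i + 1) := by
  simp [bSum, List.range_succ]

-- peel the first index off a map/flatMap over List.range (proof-side loop reshaping)
theorem map_range_shift (f : Nat → Int) (m : Nat) :
    (List.range (m + 1)).map f = f 0 :: (List.range m).map (fun i => f (i + 1)) := by
  rw [List.range_succ_eq_map, List.map_cons, List.map_map]
  rfl

theorem flatMap_range_shift (g : Nat → List Int) (m : Nat) :
    (List.range (m + 1)).flatMap g = g 0 ++ (List.range m).flatMap (fun t => g (t + 1)) := by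
  rw [List.range_succ_eq_map, List.flatMap_cons, List.flatMap_map]

-- A's inner dot loop, started at halving depth p+1, emits the closed-form dotted values
theorem aDotLoop_spec (a : Nat) (d : Nat) :
    ∀ (p : Nat) (acc : List Int),
      aDotLoop d (pyShr (a : Int) (p + 1)) ((a : Int) + bSum (a : Int) (p + 1)) acc
        = acc ++ (List.range d).map (fun i => (a : Int) + bSum (a : Int) (p + 1 + i)) := by
  induction d with
  | zero => intro p acc; simp [aDotLoop]
  | succ d ih =>
      intro p acc
      rw [aDotLoop, floordiv_pyShr]
      have hacc : (a : Int) + bSum (a : Int) (p + 1) + pyShr (a : Int) (p + 1 + 1)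
          = (a : Int) + bSum (a : Int) (p + 1 + 1) := by
        conv_rhs => rw [bSum_succ]
        ring
      rw [hacc, ih (p + 1) (acc ++ [(a : Int) + bSum (a : Int) (p + 1)])]
      rw [map_range_shift, List.append_assoc, List.singleton_append]
      congr 2
      apply List.map_congr_left
      intro i _
      have hi : p + 1 + 1 + i = p + 1 + (i + 1) := by omega
      rw [hi]

-- one full level of A (the append of n plus the dot loop) equals one closed-form block
theorem aLevel_spec (a : Nat) (d : Nat) (acc : List Int) :
    aDotLoop d (PySem.Int.floordiv (a : Int) 2) ((a : Int) + PySem.Int.floordiv (a : Int) 2)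
        (acc ++ [(a : Int)])
      = acc ++ (List.range (d + 1)).map (fun i => (a : Int) + bSum (a : Int) i) := by
  have h1 : PySem.Int.floordiv (a : Int) 2 = pyShr (a : Int) (0 + 1) := by
    rw [← floordiv_pyShr a 0, pyShr_zero]
  have hb1 : (a : Int) + pyShr (a : Int) (0 + 1) = (a : Int) + bSum (a : Int) (0 + 1) := by
    rw [bSum_succ, bSum_zero]; ring
  rw [h1, hb1, aDotLoop_spec a d 0 (acc ++ [(a : Int)])]
  rw [map_range_shift, List.append_assoc, List.singleton_append]
  simp only [bSum_zero, add_zero]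
  congr 2
  apply List.map_congr_left
  intro i _
  have hi : 0 + 1 + i = i + 1 := by omega
  rw [hi]

theorem count_eq (dots : Int) :
    (if 1 < dots then dots else 1).toNat = (dots - 1).toNat + 1 := by
  split_ifs with h <;> omega

-- the while condition at depth k holds exactly for k < bitLength (n0 // lo)
theorem cond_iff (a b : Nat) (hb : 0 < b) (k : Nat) :
    ((b : Int) ≤ pyShr (a : Int) k) ↔ k < PySem.Int.bitLength ((a / b : Nat) : Int) := by
  have hsh : pyShr (a : Int) k = ((a >>> k : Nat) : Int) := rfl
  have h3 : ((a / b : Nat) : Int).natAbs = a / b := Int.natAbs_natCast _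
  rw [hsh, Int.ofNat_le, Nat.shiftRight_eq_div_pow]
  constructor
  · intro h
    have h1 : 2 ^ k ≤ a / b := by
      rw [Nat.le_div_iff_mul_le hb]
      calc 2 ^ k * b = b * 2 ^ k := Nat.mul_comm _ _
        _ ≤ a := (Nat.le_div_iff_mul_le (Nat.two_pow_pos k)).mp h
    have hpos : 0 < a / b := lt_of_lt_of_le (Nat.two_pow_pos k) h1
    have hne : ((a / b : Nat) : Int) ≠ 0 := by exact_mod_cast hpos.ne'
    have h2 := PySem.Int.two_pow_bitLength_le _ hne
    rw [h3] at h2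
    by_contra hk
    rw [Nat.not_lt] at hk
    have h5 : 2 ^ (PySem.Int.bitLength ((a / b : Nat) : Int)) ≤ 2 ^ k :=
      Nat.pow_le_pow_right (by norm_num) hk
    have h4 := PySem.Int.lt_two_pow_bitLength ((a / b : Nat) : Int)
    rw [h3] at h4
    omega
  · intro hk
    have hne : ((a / b : Nat) : Int) ≠ 0 := by
      intro h0
      rw [h0, PySem.Int.bitLength_zero] at hk
      omega
    have h2 := PySem.Int.two_pow_bitLength_le _ hne
    rw [h3] at h2
    have h5 : 2 ^ k ≤ 2 ^ (PySem.Int.bitLength ((a / b : Nat) : Int) - 1) :=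
      Nat.pow_le_pow_right (by norm_num) (by omega)
    have h6 : 2 ^ k ≤ a / b := le_trans h5 h2
    rw [Nat.le_div_iff_mul_le hb] at h6
    rw [Nat.le_div_iff_mul_le (Nat.two_pow_pos k)]
    calc b * 2 ^ k = 2 ^ k * b := Nat.mul_comm _ _
      _ ≤ a := h6

-- A's outer loop, entered at depth k with enough fuel, produces the remaining blocks
theorem aLoop_spec (a b : Nat) (hb : 0 < b) (dots : Int)
    (L : Nat) (hL : L = PySem.Int.bitLength ((a / b : Nat) : Int)) :
    ∀ (fuel k : Nat) (acc : List Int), L ≤ k + fuel →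
      aLoop fuel (pyShr (a : Int) k) (b : Int) dots acc
        = acc ++ (List.range (L - k)).flatMap (fun t =>
            (List.range ((dots - 1).toNat + 1)).map
              (fun i => pyShr (a : Int) (k + t) + bSum (pyShr (a : Int) (k + t)) i)) := by
  intro fuel
  induction fuel with
  | zero =>
      intro k acc h
      have : L - k = 0 := by omega
      simp [aLoop, this]
  | succ fuel ih =>
      intro k acc h
      rw [aLoop]
      by_cases hc : ((b : Int) ≤ pyShr (a : Int) k)
      · rw [if_pos hc]
        have hk : k < L := by rw [hL]; exact (cond_iff a b hb k).mp hc
        have hsh : pyShr (a : Int) k = (((a >>> k : Nat)) : Int) := rfl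
        have hfd : PySem.Int.floordiv (pyShr (a : Int) k) 2 = pyShr (a : Int) (k + 1) :=
          floordiv_pyShr a k
        have hlevel := aLevel_spec (a >>> k) (dots - 1).toNat acc
        rw [← hsh] at hlevel
        rw [hlevel, hfd, ih (k + 1) _ (by omega)]
        have hLk : L - k = (L - (k + 1)) + 1 := by omega
        rw [hLk, flatMap_range_shift, List.append_assoc]
        congr 1
        congr 1
        congr 1
        funext t
        have ht : k + 1 + t = k + (t + 1) := by omega
        rw [ht]
      · rw [if_neg hc]
        have hk : L ≤ k := by
          by_contra hk'
          exact hc ((cond_iff a b hb k).mpr (by omega))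
        have : L - k = 0 := by omega
        simp [this]

-- B's pass-1 while loop, entered at depth k with enough fuel, collects the remaining
-- halvings and ends with x = a >> L
theorem bHalve_spec (a b : Nat) (hb : 0 < b)
    (L : Nat) (hL : L = PySem.Int.bitLength ((a / b : Nat) : Int)) :
    ∀ (fuel k : Nat) (acc : List Int), L ≤ k + fuel → k ≤ L →
      bHalve fuel (pyShr (a : Int) k) (b : Int) acc
        = (acc ++ (List.range (L - k)).map (fun t => pyShr (a : Int) (k + t)), pyShr (a : Int) L) := by
  intro fuel
  induction fuel with
  | zero =>
      intro k acc h hk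
      have hkL : k = L := by omega
      have h0 : L - k = 0 := by omega
      simp [bHalve, hkL]
  | succ fuel ih =>
      intro k acc h hkle
      rw [bHalve]
      by_cases hc : ((b : Int) ≤ pyShr (a : Int) k)
      · rw [if_pos hc]
        have hk : k < L := by rw [hL]; exact (cond_iff a b hb k).mp hc
        rw [floordiv_pyShr, ih (k + 1) _ (by omega) (by omega)]
        have hLk : L - k = (L - (k + 1)) + 1 := by omega
        rw [hLk, map_range_shift, List.append_assoc, List.singleton_append]
        congr 3
        apply List.map_congr_left
        intro t _
        have ht : k + 1 + t = k + (t + 1) := by omega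
        rw [ht]
      · rw [if_neg hc]
        have hk : L ≤ k := by
          by_contra hk'
          exact hc ((cond_iff a b hb k).mpr (by omega))
        have hkL : k = L := by omega
        have h0 : L - k = 0 := by omega
        simp [hkL]

-- B's extension loop appends e further halvings starting at depth s
theorem bExtend_spec (a : Nat) (e : Nat) :
    ∀ (s : Nat) (acc : List Int),
      bExtend e (pyShr (a : Int) s) acc
        = acc ++ (List.range e).map (fun t => pyShr (a : Int) (s + t)) := by
  induction e with
  | zero => intro s acc; simp [bExtend]
  | succ e ih =>
      intro s acc
      rw [bExtend, floordiv_pyShr, ih (s + 1) _]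
      rw [map_range_shift, List.append_assoc, List.singleton_append]
      congr 2
      apply List.map_congr_left
      intro t _
      have ht : s + 1 + t = s + (t + 1) := by omega
      rw [ht]

-- B's pass-2 fold produces all running sums of the processed elements
theorem bPrefix_fold (hs : List Int) :
    ∀ (p : List Int) (c : Int), p.getLastD 0 = c →
      hs.foldl (fun p h => p ++ [p.getLastD 0 + h]) p
        = p ++ (List.range hs.length).map (fun t => c + (hs.take (t + 1)).sum) := by
  induction hs with
  | nil => intro p c _; simp
  | cons h hs ih =>
      intro p c hc
      rw [List.foldl_cons, hc]
      have hlast : (p ++ [c + h]).getLastD 0 = c + h := by simp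
      rw [ih (p ++ [c + h]) (c + h) hlast, List.append_assoc, List.singleton_append]
      rw [List.length_cons, map_range_shift]
      congr 2
      · simp
      · apply List.map_congr_left
        intro t _
        simp [List.take_succ_cons]
        ring

theorem bPrefix_spec (hs : List Int) :
    bPrefix hs = (List.range (hs.length + 1)).map (fun t => (hs.take t).sum) := by
  unfold bPrefix
  rw [bPrefix_fold hs [0] 0 (by simp), map_range_shift]
  simp

-- sum of the first t halvings of a
def hSum (a : Nat) (t : Nat) : Int := ((List.range t).map (fun j => pyShr (a : Int) j)).sum

theorem hSum_succ (a : Nat) (t : Nat) : hSum a (t + 1) = hSum a t + pyShr (a : Int) t := by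
  simp [hSum, List.range_succ]

-- the window sum of halvings k..k+i is A's dotted value at level k, dot i
theorem window_eq (a : Nat) (k : Nat) :
    ∀ (i : Nat), hSum a (k + i + 1) - hSum a k
      = pyShr (a : Int) k + bSum (pyShr (a : Int) k) i := by
  intro i
  induction i with
  | zero => rw [hSum_succ, bSum_zero]; ring
  | succ i ih =>
      have h1 : k + (i + 1) + 1 = (k + i + 1) + 1 := by omega
      rw [h1, hSum_succ, bSum_succ, pyShr_comp]
      have h2 : k + (i + 1) = k + i + 1 := by omega
      rw [h2]
      omega

-- ===== VERDICT (by name: the statements are the Claim_ definitions above) =====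
theorem get_duration_values_py_spec : Claim_equal_get_duration_values_py := by
  intro nr dots tempo hdom hpre
  unfold Spec_get_duration_values_py get_duration_values_py get_duration_values_py_alt
  rcases hpre with hneg | ⟨h1, h2⟩
  · -- note_range ≤ -2 : both return []
    rw [if_pos (by omega : nr < 1)]
    have hlt : nr * 1024 < PySem.Int.floordiv 1024 nr := by
      have hq := PySem.Int.floordiv_mul_add_mod 1024 nr
      have hr := PySem.Int.mod_neg_bounds (a := 1024) (b := nr) (by omega)
      set q := PySem.Int.floordiv 1024 nr
      set r := PySem.Int.mod 1024 nr
      nlinarith [sq_nonneg (nr + 2), sq_nonneg nr, mul_self_nonneg (q - nr * 1024)]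
    rw [aLoop, if_neg (not_le.mpr hlt)]
  · -- 1 ≤ note_range ≤ 1024
    rw [if_neg (by omega : ¬ nr < 1)]
    set a : Nat := (nr * 1024).toNat with ha_def
    have haI : nr * 1024 = (a : Int) := by rw [ha_def]; omega
    have ha : a ≤ 1048576 := by omega
    have hbpos : (1 : Int) ≤ PySem.Int.floordiv 1024 nr := by
      rw [PySem.Int.le_floordiv_iff_mul_le (by omega)]
      linarith
    set b : Nat := (PySem.Int.floordiv 1024 nr).toNat with hb_def
    have hbI : PySem.Int.floordiv 1024 nr = (b : Int) := by rw [hb_def]; omega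
    have hb : 0 < b := by omega
    set L : Nat := PySem.Int.bitLength ((a / b : Nat) : Int) with hL_def
    have hL64 : L ≤ 64 := by
      by_contra hL'
      rw [Nat.not_le] at hL'
      have hne : ((a / b : Nat) : Int) ≠ 0 := by
        intro h0
        rw [h0, PySem.Int.bitLength_zero] at hL_def
        omega
      have h2p := PySem.Int.two_pow_bitLength_le _ hne
      have h3 : ((a / b : Nat) : Int).natAbs = a / b := Int.natAbs_natCast _
      rw [h3, ← hL_def] at h2p
      have h5 : (2 : Nat) ^ 64 ≤ 2 ^ (L - 1) := Nat.pow_le_pow_right (by norm_num) (by omega)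
      have hab : a / b ≤ 1048576 := le_trans (Nat.div_le_self a b) ha
      have h64 : (18446744073709551616 : Nat) ≤ a / b := le_trans h5 h2p
      omega
    rw [haI, hbI]
    set dd : Nat := (dots - 1).toNat with hdd_def
    -- A side
    have hA : aLoop 64 ((a : Int)) (b : Int) dots []
        = (List.range L).flatMap (fun k =>
            (List.range (dd + 1)).map
              (fun i => pyShr (a : Int) k + bSum (pyShr (a : Int) k) i)) := by
      have := aLoop_spec a b hb dots L hL_def 64 0 [] (by omega)
      rw [pyShr_zero] at this
      rw [this, Nat.sub_zero, List.nil_append]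
      simp only [Nat.zero_add]
      rfl
    -- B side
    have hHalve : bHalve 64 ((a : Int)) (b : Int) []
        = ((List.range L).map (fun t => pyShr (a : Int) t), pyShr (a : Int) L) := by
      have := bHalve_spec a b hb L hL_def 64 0 [] (by omega) (by omega)
      rw [pyShr_zero] at this
      rw [this, Nat.sub_zero, List.nil_append]
      simp only [Nat.zero_add]
    rw [hA, count_eq, ← hdd_def, hHalve]
    unfold bWindows bOut
    simp only [List.length_map, List.length_range, Nat.add_sub_cancel]
    rw [bExtend_spec a dd L _]
    have hhs : (List.range L).map (fun t => pyShr (a : Int) t)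
        ++ (List.range dd).map (fun t => pyShr (a : Int) (L + t))
        = (List.range (L + dd)).map (fun t => pyShr (a : Int) t) := by
      rw [List.range_add, List.map_append, List.map_map]
      rfl
    rw [hhs, bPrefix_spec]
    simp only [List.length_map, List.length_range]
    have hgetD : ∀ t, t ≤ L + dd →
        ((List.range (L + dd + 1)).map
          (fun t => (((List.range (L + dd)).map (fun t => pyShr (a : Int) t)).take t).sum)).getD t 0
        = hSum a t := by
      intro t ht
      rw [List.getD_eq_getElem?_getD, List.getElem?_map,
          List.getElem?_range (by omega : t < L + dd + 1)]
      simp only [Option.map_some, Option.getD_some]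
      rw [← List.map_take, List.take_range]
      have : min t (L + dd) = t := by omega
      rw [this]
      rfl
    have hfun : ∀ k ∈ List.range L, (fun k =>
          (List.range (dd + 1)).map
            (fun i => pyShr (a : Int) k + bSum (pyShr (a : Int) k) i)) k
        = (fun k => (List.range (dd + 1)).map (fun i =>
            ((List.range (L + dd + 1)).map
              (fun t => (((List.range (L + dd)).map (fun t => pyShr (a : Int) t)).take t).sum)).getD (k + i + 1) 0
            - ((List.range (L + dd + 1)).map
              (fun t => (((List.range (L + dd)).map (fun t => pyShr (a : Int) t)).take t).sum)).getD k 0)) k := by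
      intro k hk
      rw [List.mem_range] at hk
      apply List.map_congr_left
      intro i hi
      rw [List.mem_range] at hi
      rw [hgetD (k + i + 1) (by omega), hgetD k (by omega), window_eq]
    rw [List.flatMap_def, List.flatMap_def]
    exact congrArg List.flatten (List.map_congr_left hfun)
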